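-- pv_equiv track=rewrite | github.com/kMajumder-Hub/enigma-machine | enigma_app.py | _create_plugboard
-- ===== SOURCE A (Python) =====
-- import string
--
-- ALPHABET = string.ascii_uppercase
--
-- def _create_plugboard(pairs):
--     plugboard = {char: char for char in ALPHABET}
--     if pairs:
--         for pair in pairs.split(','):
--             pair = pair.strip().upper()
--             if len(pair) == 2 and pair[0] in ALPHABET and pair[1] in ALPHABET:
--                 plugboard[pair[0]] = pair[1]
--                 plugboard[pair[1]] = pair[0]
--     return plugboard
-- ===== SOURCE B (Python) =====
-- import string
--
-- ALPHABET = string.ascii_uppercase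
--
-- def _create_plugboard(pairs):
--     # Collect the valid swap pairs into a list (no dict mutation), then fill
--     # the full map in one comprehension, resolving each letter by scanning the
--     # swap list newest-first (last write wins).
--     swaps = []
--     if pairs:
--         for tok in pairs.split(','):
--             t = tok.strip().upper()
--             if len(t) == 2:
--                 a, b = t
--                 if a in ALPHABET and b in ALPHABET:
--                     swaps.append((a, b))
--
--     def partner(c):
--         for a, b in reversed(swaps):
--             if c == a:
--                 return b
--             if c == b:
--                 return a
--         return c
--
--     return {c: partner(c) for c in ALPHABET}
-- ===== Notes on version B (the rewrite author's own statement) =====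
-- stated objective: alternative
-- what changed: B never builds or mutates the 26-entry dict: it collects the valid swap pairs into a list and then produces the mapping in one comprehension, resolving each letter by a newest-first scan of the swap list (last write wins), instead of A's in-place dict overwrites.
import Mathlib
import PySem

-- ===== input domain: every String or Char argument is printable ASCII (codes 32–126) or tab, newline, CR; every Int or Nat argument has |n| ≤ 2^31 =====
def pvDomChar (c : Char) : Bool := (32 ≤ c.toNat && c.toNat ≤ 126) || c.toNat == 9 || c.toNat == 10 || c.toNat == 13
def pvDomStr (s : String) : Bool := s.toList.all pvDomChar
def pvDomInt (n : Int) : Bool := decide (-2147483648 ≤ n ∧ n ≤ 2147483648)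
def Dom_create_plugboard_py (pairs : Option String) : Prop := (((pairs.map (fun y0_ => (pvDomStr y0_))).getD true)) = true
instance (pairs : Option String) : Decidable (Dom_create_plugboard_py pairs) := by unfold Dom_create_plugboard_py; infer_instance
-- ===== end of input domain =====

set_option maxHeartbeats 1000000

-- B replaces A's mutated 26-entry dict by a swap-pair list plus a newest-first scan
-- when producing the full mapping (objective: alternative decomposition, same cost class).

-- ===== PORT A =====
def pvALPHA : String := "ABCDEFGHIJKLMNOPQRSTUVWXYZ"

-- A's loop body: strip/upper the token, validate it, overwrite both dict entries.
def pvStepA (d : PySem.Dict String String) (tok : String) : PySem.Dict String String :=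
  let p := PySem.Str.upper (PySem.Str.strip tok)
  if PySem.Str.len p = 2 then
    match PySem.Str.pyGet? p 0, PySem.Str.pyGet? p 1 with
    | some a, some b =>
      if PySem.Str.isIn (String.ofList [a]) pvALPHA && PySem.Str.isIn (String.ofList [b]) pvALPHA then
        (d.insert (String.ofList [a]) (String.ofList [b])).insert (String.ofList [b]) (String.ofList [a])
      else d
    | _, _ => d
  else d

def create_plugboard_py (pairs : Option String) : List (String × String) :=
  let plugboard : PySem.Dict String String :=
    pvALPHA.toList.foldl (fun d c => d.insert (String.ofList [c]) (String.ofList [c])) PySem.Dict.empty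
  let plugboard : PySem.Dict String String :=
    match pairs with
    | none => plugboard
    | some s =>
      if s = "" then plugboard
      else ((PySem.Chars.splitOn s.toList ",".toList).map String.ofList).foldl pvStepA plugboard
  plugboard.items

-- ===== PORT B =====
-- B's loop body: append the validated pair (unpacked from the 2-char token) to the swap list.
def pvStepB (acc : List (String × String)) (tok : String) : List (String × String) :=
  let p := PySem.Str.upper (PySem.Str.strip tok)
  if PySem.Str.len p = 2 then
    match p.toList with
    | [a, b] =>
      if PySem.Str.isIn (String.ofList [a]) pvALPHA && PySem.Str.isIn (String.ofList [b]) pvALPHA then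
        acc ++ [(String.ofList [a], String.ofList [b])]
      else acc
    | _ => acc
  else acc

-- partner(c): scan the reversed swap list, first hit wins.
def pvPartner : List (String × String) → String → String
  | [], c => c
  | (a, b) :: rest, c => if c = a then b else if c = b then a else pvPartner rest c

def create_plugboard_py_alt (pairs : Option String) : List (String × String) :=
  let swaps : List (String × String) :=
    match pairs with
    | none => []
    | some s =>
      if s = "" then []
      else ((PySem.Chars.splitOn s.toList ",".toList).map String.ofList).foldl pvStepB []
  pvALPHA.toList.map (fun c => (String.ofList [c], pvPartner swaps.reverse (String.ofList [c])))

-- ===== PRECONDITION & SPEC =====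
def Spec_create_plugboard_py (pairs : Option String) (out : List (String × String)) : Prop := out = create_plugboard_py_alt pairs
instance (pairs : Option String) (out : List (String × String)) : Decidable (Spec_create_plugboard_py pairs out) := by unfold Spec_create_plugboard_py; infer_instance

-- ===== CLAIM (what is proved, stated in full; the proofs are below) =====
def Claim_equal_create_plugboard_py : Prop := ∀ (pairs : Option String), Dom_create_plugboard_py pairs → Spec_create_plugboard_py pairs (create_plugboard_py pairs)

-- ===== LEMMAS AND PROOFS =====
def pvAlphaStrs : List String := pvALPHA.toList.map (fun c => String.ofList [c])

-- the valid pairs of the token list, newest first (the order pvPartner consumes)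
def pvVRev : List String → List (String × String)
  | [] => []
  | t :: ts => pvVRev ts ++ pvStepB [] t

theorem pvMem_of_isIn (a : Char) (h : PySem.Str.isIn (String.ofList [a]) pvALPHA = true) :
    String.ofList [a] ∈ pvAlphaStrs := by
  rw [PySem.Str.isIn_eq] at h
  have h2 := (PySem.Chars.isIn_iff_infix _ _).mp h
  simp at h2
  exact List.mem_map_of_mem (List.singleton_sublist.mp h2.sublist)

theorem pvStepB_append (acc : List (String × String)) (tok : String) :
    pvStepB acc tok = acc ++ pvStepB [] tok := by
  unfold pvStepB
  dsimp only
  split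
  · split
    · split <;> simp
    · simp
  · simp

theorem pvStepB_reverse (tok : String) : (pvStepB [] tok).reverse = pvStepB [] tok := by
  unfold pvStepB
  dsimp only
  split
  · split
    · split <;> simp
    · simp
  · simp

theorem pvFoldB (ts : List String) (acc : List (String × String)) :
    (ts.foldl pvStepB acc).reverse = pvVRev ts ++ acc.reverse := by
  induction ts generalizing acc with
  | nil => simp [pvVRev]
  | cons t ts ih =>
    rw [List.foldl_cons, ih, pvStepB_append acc t, List.reverse_append, pvStepB_reverse]
    simp [pvVRev, List.append_assoc]

theorem pvInsert_items (d : PySem.Dict String String) (g : String → String) (a v : String)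
    (ha : a ∈ pvAlphaStrs) (hd : d.items = pvAlphaStrs.map (fun c => (c, g c))) :
    (d.insert a v).items = pvAlphaStrs.map (fun c => (c, if c = a then v else g c)) := by
  have hc : d.contains a = true := by
    rw [PySem.Dict.contains_iff_mem_keys]
    have hcomp : ((fun x : String × String => x.1) ∘ fun c : String => (c, g c)) = id := rfl
    have hk : d.keys = pvAlphaStrs := by
      simp only [PySem.Dict.keys, hd, List.map_map, hcomp, List.map_id]
    rw [hk]; exact ha
  rw [PySem.Dict.items_insert_of_contains d v hc, hd, List.map_map]
  apply List.map_congr_left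
  intro c _
  by_cases hca : c = a
  · subst hca; simp
  · simp [Function.comp, hca]

theorem pvSwapIf (A B c : String) (sw : List (String × String)) :
    (if c = B then A else if c = A then B else pvPartner sw c) = pvPartner ((A, B) :: sw) c := by
  simp only [pvPartner]
  split_ifs <;> simp_all

theorem pvStepA_items (d : PySem.Dict String String) (sw : List (String × String)) (t : String)
    (hd : d.items = pvAlphaStrs.map (fun c => (c, pvPartner sw c))) :
    (pvStepA d t).items = pvAlphaStrs.map (fun c => (c, pvPartner (pvStepB [] t ++ sw) c)) := by
  unfold pvStepA pvStepB
  dsimp only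
  generalize PySem.Str.upper (PySem.Str.strip t) = p
  by_cases hlen : PySem.Str.len p = 2
  · rw [if_pos hlen, if_pos hlen]
    have hl2 : p.toList.length = 2 := by
      simp at hlen; exact_mod_cast hlen
    obtain ⟨a, b, hab⟩ := List.length_eq_two.mp hl2
    have h0 : PySem.Str.pyGet? p 0 = some a := by simp [hab]
    have h1 : PySem.Str.pyGet? p 1 = some b := by
      simp [PySem.List.pyGet?, PySem.List.pyIdx?, hab]
    rw [h0, h1, hab]
    dsimp only
    by_cases hin : (PySem.Str.isIn (String.ofList [a]) pvALPHA
        && PySem.Str.isIn (String.ofList [b]) pvALPHA) = true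
    · rw [if_pos hin, if_pos hin]
      have hA : String.ofList [a] ∈ pvAlphaStrs :=
        pvMem_of_isIn a ((Bool.and_eq_true _ _ ▸ hin).1)
      have hB : String.ofList [b] ∈ pvAlphaStrs :=
        pvMem_of_isIn b ((Bool.and_eq_true _ _ ▸ hin).2)
      have e1 := pvInsert_items d (pvPartner sw) (String.ofList [a]) (String.ofList [b]) hA hd
      have e2 := pvInsert_items (d.insert (String.ofList [a]) (String.ofList [b]))
        (fun c => if c = String.ofList [a] then String.ofList [b] else pvPartner sw c)
        (String.ofList [b]) (String.ofList [a]) hB e1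
      rw [e2]
      apply List.map_congr_left
      intro c _
      rw [List.nil_append, List.singleton_append]
      exact congrArg (fun x => (c, x)) (pvSwapIf _ _ c sw)
    · rw [if_neg hin, if_neg hin, hd]
      simp
  · rw [if_neg hlen, if_neg hlen, hd]
    simp

theorem pvFoldA (ts : List String) (d : PySem.Dict String String) (sw : List (String × String))
    (hd : d.items = pvAlphaStrs.map (fun c => (c, pvPartner sw c))) :
    (ts.foldl pvStepA d).items = pvAlphaStrs.map (fun c => (c, pvPartner (pvVRev ts ++ sw) c)) := by
  induction ts generalizing d sw with
  | nil => simpa [pvVRev] using hd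
  | cons t ts ih =>
    rw [List.foldl_cons]
    rw [ih _ _ (pvStepA_items d sw t hd)]
    simp [pvVRev, List.append_assoc]

theorem pvInit_items :
    (pvALPHA.toList.foldl (fun d c => d.insert (String.ofList [c]) (String.ofList [c]))
      PySem.Dict.empty).items = pvAlphaStrs.map (fun c => (c, pvPartner [] c)) := by
  have hnodup : (pvALPHA.toList.map (fun c => String.ofList [c])).Nodup := by
    refine List.Nodup.map ?_ (by decide)
    intro c c' h
    have := congrArg String.toList h
    simpa using this
  rw [PySem.Dict.items_foldl_insert_fresh pvALPHA.toList (fun c => String.ofList [c])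
      (fun c => String.ofList [c]) PySem.Dict.empty (fun a _ => PySem.Dict.contains_empty _) hnodup]
  simp [pvAlphaStrs, List.map_map, pvPartner]
  rfl

-- ===== VERDICT (by name: the statement is the Claim_ definition above) =====
theorem create_plugboard_py_spec : Claim_equal_create_plugboard_py := by
  intro pairs _
  unfold Spec_create_plugboard_py create_plugboard_py create_plugboard_py_alt
  have hmap : ∀ sw : List (String × String),
      pvALPHA.toList.map (fun c => (String.ofList [c], pvPartner sw (String.ofList [c]))) =
      pvAlphaStrs.map (fun c => (c, pvPartner sw c)) := by
    intro sw; rw [pvAlphaStrs, List.map_map]; rfl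
  cases pairs with
  | none =>
    dsimp only
    rw [hmap, pvInit_items]
    simp [pvPartner]
  | some s =>
    dsimp only
    by_cases hs : s = ""
    · subst hs
      rw [if_pos rfl, if_pos rfl, hmap, pvInit_items]
      simp [pvPartner]
    · rw [if_neg hs, if_neg hs]
      rw [hmap, pvFoldA _ _ [] pvInit_items, pvFoldB]
      simp
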